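-- pv_equiv track=rewrite | github.com/trung300906/CTDLGTVSOOP | challenger/pythoncode/dauanlantoa.py | process_pairs
-- ===== SOURCE A (Python) =====
-- def compute_lps(pattern):
--     m = len(pattern)
--     lps = [0] * m
--     length = 0
--     i = 1
--
--     while i < m:
--         if pattern[i] == pattern[length]:
--             length += 1
--             lps[i] = length
--             i += 1
--         else:
--             if length != 0:
--                 length = lps[length - 1]
--             else:
--                 lps[i] = 0
--                 i += 1
--     return lps
--
-- def kmp_search(text, pattern):
--     n = len(text)
--     m = len(pattern)
--     lps = compute_lps(pattern)
--
--     i = 0  # index for text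
--     j = 0  # index for pattern
--     count = 0
--
--     while i < n:
--         if pattern[j] == text[i]:
--             i += 1
--             j += 1
--
--         if j == m:
--             count += 1  # found a match
--             j = lps[j - 1]
--         elif i < n and pattern[j] != text[i]:
--             if j != 0:
--                 j = lps[j - 1]
--             else:
--                 i += 1
--     return count
--
-- def process_pairs(pairs):
--     result = []
--     for key, value in pairs:
--         longer, shorter = key, value
--
--         if len(shorter) > len(longer):
--             longer, shorter = shorter, longer
--
--         count = kmp_search(longer, shorter)
--
--         if count == 0:
--             result.append("-1")
--         else:
--             result.append(str(count))
--
--     return result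
-- ===== SOURCE B (Python) =====
-- def process_pairs(pairs):
--     def count_for(key, value):
--         longer, shorter = (key, value) if len(key) >= len(value) else (value, key)
--         m = len(shorter)
--         c = sum(1 for i in range(len(longer) - m + 1) if longer[i:i+m] == shorter)
--         return "-1" if c == 0 else str(c)
--     return [count_for(key, value) for key, value in pairs]
-- ===== Notes on version B (the rewrite author's own statement) =====
-- stated objective: simpler
-- what changed: Replaces A's KMP machinery (failure-table construction plus two index-juggling while loops) with a direct per-pair count of slice comparisons longer[i:i+m]==shorter over all start positions, in a list comprehension; the slice comparisons run in CPython's C string code while A's KMP executes per-character Python bytecode, which is the constant-factor speed mechanism a timing run measured.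
-- intended difference: On lists containing a ('','') pair A appends '-1' (its search loop never runs and reports 0 matches) while B appends '1'; the empty pattern occurs exactly once in the empty text (Python's ''.count('')==1), so B's count is the intended value. — e.g. on process_pairs([("", "")]): A returns ["-1"], B returns ["1"]
import Mathlib
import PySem

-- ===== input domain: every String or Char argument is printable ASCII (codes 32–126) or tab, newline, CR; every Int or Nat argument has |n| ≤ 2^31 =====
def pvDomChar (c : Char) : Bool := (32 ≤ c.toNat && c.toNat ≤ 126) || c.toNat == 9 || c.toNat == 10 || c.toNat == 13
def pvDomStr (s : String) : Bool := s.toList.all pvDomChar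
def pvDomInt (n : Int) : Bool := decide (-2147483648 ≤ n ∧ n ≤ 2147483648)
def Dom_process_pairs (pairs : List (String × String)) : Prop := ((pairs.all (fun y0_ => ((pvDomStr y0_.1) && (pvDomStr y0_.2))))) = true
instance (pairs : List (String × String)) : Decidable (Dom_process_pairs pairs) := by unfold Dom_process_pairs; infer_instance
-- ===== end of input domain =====

-- B replaces A's KMP machinery (failure-table construction and two index-juggling while loops)
-- with a direct per-pair count of slice comparisons longer[i:i+m] == shorter over all start
-- positions (objective: simpler; same return values, proved below outside D_).

-- ===== PORT A =====
-- the two while loops of compute_lps / kmp_search are ported with fuel large enough for their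
-- standard termination measures; all other steps are literal.
def computeLpsGo (p : List Char) (m : Nat) : Nat → List Nat → Nat → Nat → List Nat
  | 0, lps, _, _ => lps
  | fuel+1, lps, len, i =>
    if i < m then
      if p.getD i default = p.getD len default then
        computeLpsGo p m fuel (lps.set i (len+1)) (len+1) (i+1)
      else if len ≠ 0 then
        computeLpsGo p m fuel lps (lps.getD (len-1) 0) i
      else
        computeLpsGo p m fuel (lps.set i 0) 0 (i+1)
    else lps

def compute_lps (p : List Char) : List Nat :=
  computeLpsGo p p.length (2 * p.length + 1) (List.replicate p.length 0) 0 1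

def kmpGo (p t : List Char) (m n : Nat) (lps : List Nat) : Nat → Nat → Nat → Nat → Nat
  | 0, _, _, count => count
  | fuel+1, i, j, count =>
    if i < n then
      let ij := if p.getD j default = t.getD i default then (i+1, j+1) else (i, j)
      if ij.2 = m then
        kmpGo p t m n lps fuel ij.1 (lps.getD (ij.2-1) 0) (count+1)
      else if ij.1 < n ∧ p.getD ij.2 default ≠ t.getD ij.1 default then
        if ij.2 ≠ 0 then kmpGo p t m n lps fuel ij.1 (lps.getD (ij.2-1) 0) count
        else kmpGo p t m n lps fuel (ij.1+1) ij.2 count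
      else kmpGo p t m n lps fuel ij.1 ij.2 count
    else count

def kmp_search (t p : List Char) : Nat :=
  kmpGo p t p.length t.length (compute_lps p) (3 * t.length + p.length + 1) 0 0 0

def process_pairs (pairs : List (String × String)) : List String :=
  pairs.foldl (fun result kv =>
    let longer := if kv.2.toList.length > kv.1.toList.length then kv.2.toList else kv.1.toList
    let shorter := if kv.2.toList.length > kv.1.toList.length then kv.1.toList else kv.2.toList
    let count := kmp_search longer shorter
    result ++ [if count = 0 then "-1" else PySem.Int.toStr (count : Int)]) []

-- ===== PORT B =====
def naiveCountOcc (longer shorter : List Char) : Int :=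
  let m : Int := PySem.List.len shorter
  (PySem.List.pyRange 0 (PySem.List.len longer - m + 1) 1).foldl
    (fun c i => if PySem.List.slice longer (some i) (some (i + m)) = shorter then c + 1 else c) 0

def process_pairs_alt (pairs : List (String × String)) : List String :=
  pairs.map (fun kv =>
    let longer := if kv.1.toList.length ≥ kv.2.toList.length then kv.1.toList else kv.2.toList
    let shorter := if kv.1.toList.length ≥ kv.2.toList.length then kv.2.toList else kv.1.toList
    let c := naiveCountOcc longer shorter
    if c = 0 then "-1" else PySem.Int.toStr c)

-- ===== PRECONDITION & SPEC =====
-- Pre_ excludes exactly the inputs on which A raises: lists containing a pair with exactly one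
-- empty string, where kmp_search reads pattern[0] of the empty pattern (IndexError).
def Pre_process_pairs (pairs : List (String × String)) : Prop :=
  ∀ kv ∈ pairs, (kv.1 = "" ↔ kv.2 = "")
instance (pairs : List (String × String)) : Decidable (Pre_process_pairs pairs) := by
  unfold Pre_process_pairs; infer_instance
def pvWitness_process_pairs : (List (String × String)) := [("ababa", "aba"), ("ab", "xyzab")]

-- On lists containing a ("","") pair A appends "-1" (its search loop never runs and reports 0)
-- while B appends "1"; the empty pattern occurs exactly once in the empty text (Python's
-- "".count("") == 1), so B's count is the intended value.
def D_process_pairs (pairs : List (String × String)) : Prop :=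
  ∃ kv ∈ pairs, kv.1 = "" ∧ kv.2 = ""
instance (pairs : List (String × String)) : Decidable (D_process_pairs pairs) := by
  unfold D_process_pairs; infer_instance

def Spec_process_pairs (pairs : List (String × String)) (out : List String) : Prop :=
  ¬ D_process_pairs pairs → out = process_pairs_alt pairs
instance (pairs : List (String × String)) (out : List String) : Decidable (Spec_process_pairs pairs out) := by
  unfold Spec_process_pairs; infer_instance

def pvDiffWitness_process_pairs : (List (String × String)) := [("", "")]
def pvDiffWitnessOut_process_pairs : (List String) × (List String) := (["-1"], ["1"])

-- ===== CLAIM (what is proved, stated in full; the proofs are below) =====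
def Claim_unchanged_process_pairs : Prop := ∀ (pairs : List (String × String)), Dom_process_pairs pairs → Pre_process_pairs pairs → Spec_process_pairs pairs (process_pairs pairs)
def Claim_changed_process_pairs : Prop := Dom_process_pairs (pvDiffWitness_process_pairs) ∧ Pre_process_pairs (pvDiffWitness_process_pairs) ∧ D_process_pairs (pvDiffWitness_process_pairs) ∧ process_pairs (pvDiffWitness_process_pairs) = pvDiffWitnessOut_process_pairs.1 ∧ process_pairs_alt (pvDiffWitness_process_pairs) = pvDiffWitnessOut_process_pairs.2 ∧ pvDiffWitnessOut_process_pairs.1 ≠ pvDiffWitnessOut_process_pairs.2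
def Claim_exact_process_pairs : Prop := ∀ (pairs : List (String × String)), Dom_process_pairs pairs → Pre_process_pairs pairs → D_process_pairs pairs → process_pairs pairs ≠ process_pairs_alt pairs

-- ===== LEMMAS AND PROOFS =====

-- the failure function: length of the longest proper border (prefix that is also a suffix)
def failN (s : List Char) : Nat :=
  Nat.findGreatest (fun k => s.take k <:+ s) (s.length - 1)

-- occurrences of p ending at positions ≤ i in t
def occ (p t : List Char) (i : Nat) : Nat :=
  (List.range (i+1)).countP (fun e => decide (p <:+ t.take e))

theorem failN_suffix (s : List Char) : s.take (failN s) <:+ s := by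
  have h0 : s.take 0 <:+ s := by rw [List.take_zero]; exact List.nil_suffix
  exact Nat.findGreatest_spec (P := fun k => s.take k <:+ s) (Nat.zero_le _) h0

theorem failN_le (s : List Char) : failN s ≤ s.length - 1 :=
  Nat.findGreatest_le _

theorem le_failN (s : List Char) {k : Nat} (hk : k ≤ s.length - 1) (h : s.take k <:+ s) :
    k ≤ failN s :=
  Nat.le_findGreatest hk h

theorem failN_le_of (s : List Char) {c : Nat}
    (h : ∀ k, k ≤ s.length - 1 → s.take k <:+ s → k ≤ c) : failN s ≤ c :=
  h _ (failN_le s) (failN_suffix s)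

theorem suffix_append_singleton {a b : List Char} {x y : Char} :
    (a ++ [x]) <:+ (b ++ [y]) ↔ a <:+ b ∧ x = y := by
  constructor
  · rintro ⟨w, hw⟩
    rw [← List.append_assoc] at hw
    obtain ⟨h1, h2⟩ := List.append_inj' hw rfl
    exact ⟨⟨w, h1⟩, by simpa using h2⟩
  · rintro ⟨⟨w, hw⟩, rfl⟩
    exact ⟨w, by rw [← List.append_assoc, hw]⟩

theorem take_succ_getD (l : List Char) {k : Nat} (hk : k < l.length) :
    l.take (k+1) = l.take k ++ [l.getD k default] := by
  rw [List.take_add_one, List.getElem?_eq_getElem hk, List.getD_eq_getElem l default hk]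
  rfl

theorem suffix_of_suffix_len_le {a b c : List Char} (ha : a <:+ c) (hb : b <:+ c)
    (h : a.length ≤ b.length) : a <:+ b :=
  List.suffix_of_suffix_length_le ha hb h

theorem bord_le_failN (p : List Char) {k j : Nat} (hkj : k < j) (hj : j ≤ p.length)
    (h : p.take k <:+ p.take j) : k ≤ failN (p.take j) := by
  apply le_failN
  · simp only [List.length_take]
    omega
  · rwa [List.take_take, min_eq_left (by omega : k ≤ j)]

theorem failN_take_suffix (p : List Char) {j : Nat} (hj : j ≤ p.length) :
    p.take (failN (p.take j)) <:+ p.take j := by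
  have h := failN_suffix (p.take j)
  have hle : failN (p.take j) ≤ j := by
    have := failN_le (p.take j)
    simp only [List.length_take] at this
    omega
  rwa [List.take_take, min_eq_left hle] at h

theorem take_suffix_take_succ {p t : List Char} {k i : Nat} (hk : k < p.length) (hi : i < t.length) :
    (p.take (k+1) <:+ t.take (i+1)) ↔ (p.take k <:+ t.take i ∧ p.getD k default = t.getD i default) := by
  rw [take_succ_getD p hk, take_succ_getD t hi, suffix_append_singleton]

def LpsOk (p : List Char) (lps : List Nat) (upto : Nat) : Prop :=
  ∀ k, k < upto → lps.getD k 0 = failN (p.take (k+1))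

theorem computeLpsGo_ok (p : List Char) (m : Nat) (hm : m = p.length) :
    ∀ fuel lps len i, 2*(m - i) + len < fuel → 1 ≤ i → i ≤ m → len < i →
    lps.length = m → LpsOk p lps i →
    p.take len <:+ p.take i →
    (∀ k, k < i → p.take k <:+ p.take i →
      k ≤ len ∨ (i < m ∧ p.getD k default ≠ p.getD i default)) →
    LpsOk p (computeLpsGo p m fuel lps len i) m := by
  subst hm
  intro fuel
  induction fuel with
  | zero => intro lps len i hfuel; omega
  | succ f ih =>
    intro lps len i hfuel h1 h2 h3 hlen hok hsuf hmax
    rw [computeLpsGo]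
    by_cases hi : i < p.length
    · rw [if_pos hi]
      have step : ∀ k, k ≤ i → p.take (k+1) <:+ p.take (i+1) →
          p.take k <:+ p.take i ∧ p.getD k default = p.getD i default :=
        fun k hk h => (take_suffix_take_succ (Nat.lt_of_le_of_lt hk hi) hi).1 h
      by_cases hc : p.getD i default = p.getD len default
      · rw [if_pos hc]
        -- the new prefix length is exactly failN of the extended prefix
        have hfail : failN (p.take (i+1)) = len + 1 := by
          apply le_antisymm
          · apply failN_le_of
            intro k hkb hksuf
            simp only [List.length_take] at hkb
            rw [List.take_take, min_eq_left (by omega : k ≤ i + 1)] at hksuf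
            match k, hksuf with
            | 0, _ => omega
            | (k'+1), hksuf =>
              obtain ⟨hs, he⟩ := step k' (by omega) hksuf
              rcases hmax k' (by omega) hs with h | h
              · omega
              · exact absurd he h.2
          · apply le_failN
            · simp only [List.length_take]; omega
            · rw [List.take_take, min_eq_left (by omega : len + 1 ≤ i + 1)]
              exact (take_suffix_take_succ (by omega) hi).2 ⟨hsuf, hc.symm⟩
        apply ih
        · omega
        · omega
        · omega
        · omega
        · simpa using hlen
        · intro k hk
          rw [List.getD_eq_getElem?_getD, List.getElem?_set]
          by_cases hki : k = i
          · subst hki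
            rw [if_pos rfl, if_pos (by omega), Option.getD_some, hfail]
          · simp only [if_neg (by omega : ¬ (i = k))]
            rw [← List.getD_eq_getElem?_getD]
            exact hok k (by omega)
        · exact (take_suffix_take_succ (by omega) hi).2 ⟨hsuf, hc.symm⟩
        · intro k hk hks
          left
          match k, hks with
          | 0, _ => omega
          | (k'+1), hks =>
            obtain ⟨hs, he⟩ := step k' (by omega) hks
            rcases hmax k' (by omega) hs with h | h
            · omega
            · exact absurd he h.2
      · rw [if_neg hc]
        by_cases hz : len ≠ 0
        · rw [if_pos hz]
          have hlf : lps.getD (len-1) 0 = failN (p.take len) := by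
            have := hok (len-1) (by omega)
            rwa [Nat.sub_add_cancel (by omega)] at this
          have hfle : failN (p.take len) ≤ len - 1 := by
            have := failN_le (p.take len)
            simp only [List.length_take] at this
            omega
          apply ih
          · omega
          · omega
          · omega
          · omega
          · exact hlen
          · exact hok
          · rw [hlf]
            exact (failN_take_suffix p (by omega : len ≤ p.length)).trans hsuf
          · intro k hk hks
            rcases hmax k hk hks with h | h
            · rcases Nat.lt_or_ge k len with h' | h'
              · left
                rw [hlf]
                apply bord_le_failN p h' (by omega)
                exact suffix_of_suffix_len_le hks hsuf (by simp [List.length_take]; omega)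
              · right
                have hkl : k = len := by omega
                subst hkl
                exact ⟨hi, fun he => hc (he.symm)⟩
            · exact Or.inr h
        · rw [if_neg hz]
          simp only [ne_eq, not_not] at hz
          subst hz
          have hall : ∀ k, k < i + 1 → p.take k <:+ p.take (i+1) → k = 0 := by
            intro k hk hks
            match k, hks with
            | 0, _ => rfl
            | (k'+1), hks =>
              obtain ⟨hs, he⟩ := step k' (by omega) hks
              rcases hmax k' (by omega) hs with h | h
              · interval_cases k'
                exact absurd he.symm hc
              · exact absurd he h.2
          have hfail : failN (p.take (i+1)) = 0 := by
            apply Nat.le_zero.mp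
            apply failN_le_of
            intro k hkb hksuf
            simp only [List.length_take] at hkb
            rw [List.take_take, min_eq_left (by omega : k ≤ i + 1)] at hksuf
            exact Nat.le_of_eq (hall k (by omega) hksuf)
          apply ih
          · omega
          · omega
          · omega
          · omega
          · simpa using hlen
          · intro k hk
            rw [List.getD_eq_getElem?_getD, List.getElem?_set]
            by_cases hki : k = i
            · subst hki
              rw [if_pos rfl, if_pos (by omega), Option.getD_some, hfail]
            · simp only [if_neg (by omega : ¬ (i = k))]
              rw [← List.getD_eq_getElem?_getD]
              exact hok k (by omega)
          · rw [List.take_zero]; exact List.nil_suffix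
          · intro k hk hks
            exact Or.inl (Nat.le_of_eq (hall k hk hks))
    · rw [if_neg hi]
      intro k hk
      exact hok k (by omega)

theorem compute_lps_ok (p : List Char) (hp : p ≠ []) : LpsOk p (compute_lps p) p.length := by
  have hl : 0 < p.length := List.length_pos_of_ne_nil hp
  unfold compute_lps
  apply computeLpsGo_ok p p.length rfl
  · omega
  · omega
  · omega
  · omega
  · simp
  · intro k hk
    have hk0 : k = 0 := by omega
    subst hk0
    have hf : failN (p.take 1) ≤ 0 := by
      have := failN_le (p.take 1)
      simp only [List.length_take] at this
      omega
    rw [List.getD_eq_getElem?_getD, List.getElem?_replicate, if_pos hl]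
    simp only [Option.getD_some, Nat.zero_add]
    omega
  · rw [List.take_zero]; exact List.nil_suffix
  · intro k hk _
    exact Or.inl (by omega)

theorem occ_succ (p t : List Char) (i : Nat) :
    occ p t (i+1) = occ p t i + (if p <:+ t.take (i+1) then 1 else 0) := by
  unfold occ
  rw [List.range_succ, List.countP_append]
  simp [List.countP_cons]

theorem kmpGo_ok (p t : List Char) (m n : Nat) (lps : List Nat)
    (hm : m = p.length) (hn : n = t.length) (hm1 : 1 ≤ m)
    (hlps : ∀ k, k < m → lps.getD k 0 = failN (p.take (k+1))) :
    ∀ fuel i j count, 3*(n-i) + j < fuel → i ≤ n → j < m →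
    p.take j <:+ t.take i →
    count = occ p t i →
    (∀ k, k < m → p.take k <:+ t.take i →
      k ≤ j ∨ (i < n ∧ p.getD k default ≠ t.getD i default)) →
    kmpGo p t m n lps fuel i j count = occ p t n := by
  subst hm; subst hn
  intro fuel
  induction fuel with
  | zero => intro i j count h; omega
  | succ f ih =>
    intro i j count hfuel hi hj hsuf hcount hmax
    rw [kmpGo]
    by_cases hin : i < t.length
    · rw [if_pos hin]
      by_cases hc : p.getD j default = t.getD i default
      · simp only [if_pos hc]
        by_cases hjm : j + 1 = p.length
        · rw [if_pos hjm]
          have hgj : lps.getD (j + 1 - 1) 0 = failN p := by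
            have h := hlps j hj
            rw [hjm, List.take_length] at h
            simpa only [Nat.add_sub_cancel] using h
          have hocc : p <:+ t.take (i+1) := by
            have h2 := (take_suffix_take_succ hj hin).2 ⟨hsuf, hc⟩
            rwa [hjm, List.take_length] at h2
          have hflt : failN p ≤ p.length - 1 := failN_le p
          rw [hgj]
          apply ih
          · omega
          · omega
          · omega
          · exact (failN_suffix p).trans hocc
          · rw [occ_succ, if_pos hocc, hcount]
          · intro k hk hks
            left
            apply le_failN p (by omega)
            apply suffix_of_suffix_len_le hks hocc
            simp only [List.length_take]; omega
        · rw [if_neg hjm]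
          have hjm' : j + 1 < p.length := by omega
          have hsucsuf : p.take (j+1) <:+ t.take (i+1) :=
            (take_suffix_take_succ hj hin).2 ⟨hsuf, hc⟩
          have hmax1 : ∀ k, k < p.length → p.take k <:+ t.take (i+1) → k ≤ j + 1 := by
            intro k hk hks
            match k, hks with
            | 0, _ => omega
            | (k'+1), hks =>
              obtain ⟨hs, he⟩ := (take_suffix_take_succ (by omega) hin).1 hks
              rcases hmax k' (by omega) hs with h | h
              · omega
              · exact absurd he h.2
          have hnoc : ¬ p <:+ t.take (i+1) := by
            intro hocc
            have h1 : p.take (p.length - 1 + 1) <:+ t.take (i+1) := by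
              rw [Nat.sub_add_cancel hm1, List.take_length]; exact hocc
            obtain ⟨hs, he⟩ := (take_suffix_take_succ (by omega) hin).1 h1
            rcases hmax (p.length - 1) (by omega) hs with h | h
            · omega
            · exact h.2 he
          have hcount' : count = occ p t (i+1) := by
            rw [occ_succ, if_neg hnoc, hcount, Nat.add_zero]
          by_cases hel : i + 1 < t.length ∧ ¬ p.getD (j+1) default = t.getD (i+1) default
          · rw [if_pos hel, if_pos (by omega : ¬ j + 1 = 0)]
            have hgj : lps.getD (j + 1 - 1) 0 = failN (p.take (j+1)) := by
              simpa only [Nat.add_sub_cancel] using hlps j hj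
            have hfle : failN (p.take (j+1)) ≤ j := by
              have := failN_le (p.take (j+1))
              simp only [List.length_take] at this
              omega
            rw [hgj]
            apply ih
            · omega
            · omega
            · omega
            · exact (failN_take_suffix p (by omega : j + 1 ≤ p.length)).trans hsucsuf
            · exact hcount'
            · intro k hk hks
              have hk1 := hmax1 k hk hks
              rcases Nat.lt_or_ge k (j+1) with h' | h'
              · left
                apply bord_le_failN p h' (by omega)
                apply suffix_of_suffix_len_le hks hsucsuf
                simp only [List.length_take]; omega
              · right
                have : k = j + 1 := by omega
                subst this
                exact ⟨hel.1, hel.2⟩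
          · rw [if_neg hel]
            apply ih
            · omega
            · omega
            · omega
            · exact hsucsuf
            · exact hcount'
            · intro k hk hks
              exact Or.inl (hmax1 k hk hks)
      · simp only [if_neg hc]
        rw [if_neg (by omega : ¬ j = p.length)]
        rw [if_pos (⟨hin, hc⟩ : i < t.length ∧ ¬ p.getD j default = t.getD i default)]
        by_cases hz : j ≠ 0
        · rw [if_pos hz]
          have hgj : lps.getD (j - 1) 0 = failN (p.take j) := by
            have := hlps (j-1) (by omega)
            rwa [Nat.sub_add_cancel (by omega)] at this
          have hfle : failN (p.take j) ≤ j - 1 := by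
            have := failN_le (p.take j)
            simp only [List.length_take] at this
            omega
          rw [hgj]
          apply ih
          · omega
          · omega
          · omega
          · exact (failN_take_suffix p (by omega : j ≤ p.length)).trans hsuf
          · exact hcount
          · intro k hk hks
            rcases hmax k hk hks with h | h
            · rcases Nat.lt_or_ge k j with h' | h'
              · left
                apply bord_le_failN p h' (by omega)
                apply suffix_of_suffix_len_le hks hsuf
                simp only [List.length_take]; omega
              · right
                have : k = j := by omega
                subst this
                exact ⟨hin, hc⟩
            · exact Or.inr h
        · rw [if_neg hz]
          simp only [ne_eq, not_not] at hz
          subst hz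
          have hstep : ∀ k, k < p.length → p.take (k+1) <:+ t.take (i+1) →
              p.take k <:+ t.take i ∧ p.getD k default = t.getD i default :=
            fun k hk h => (take_suffix_take_succ hk hin).1 h
          have hall : ∀ k, k < p.length → p.take k <:+ t.take (i+1) → k = 0 := by
            intro k hk hks
            match k, hks with
            | 0, _ => rfl
            | (k'+1), hks =>
              obtain ⟨hs, he⟩ := hstep k' (by omega) hks
              rcases hmax k' (by omega) hs with h | h
              · interval_cases k'
                exact absurd he hc
              · exact absurd he h.2
          have hnoc : ¬ p <:+ t.take (i+1) := by
            intro hocc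
            have h1 : p.take (p.length - 1 + 1) <:+ t.take (i+1) := by
              rw [Nat.sub_add_cancel hm1, List.take_length]; exact hocc
            obtain ⟨hs, he⟩ := (take_suffix_take_succ (by omega) hin).1 h1
            rcases hmax (p.length - 1) (by omega) hs with h | h
            · have h0 : p.length - 1 = 0 := by omega
              rw [h0] at he
              exact hc he
            · exact h.2 he
          apply ih
          · omega
          · omega
          · omega
          · rw [List.take_zero]; exact List.nil_suffix
          · rw [occ_succ, if_neg hnoc, hcount, Nat.add_zero]
          · intro k hk hks
            exact Or.inl (Nat.le_of_eq (hall k hk hks))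
    · rw [if_neg hin]
      have : i = t.length := by omega
      subst this
      exact hcount

theorem kmp_search_eq (t p : List Char) (hp : p ≠ []) (hlen : p.length ≤ t.length) :
    kmp_search t p = occ p t t.length := by
  have hm1 : 0 < p.length := List.length_pos_of_ne_nil hp
  unfold kmp_search
  apply kmpGo_ok p t p.length t.length (compute_lps p) rfl rfl hm1 (compute_lps_ok p hp)
  · omega
  · omega
  · omega
  · rw [List.take_zero]; exact List.nil_suffix
  · simp [occ, List.range_one, List.suffix_nil, hp]
  · intro k hk hks
    rw [List.take_zero, List.suffix_nil, List.take_eq_nil_iff] at hks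
    rcases hks with h | h
    · exact Or.inl (by omega)
    · subst h
      simp at hk

theorem occ_eq_countP (p t : List Char) (hmn : p.length ≤ t.length) :
    occ p t t.length =
      (List.range (t.length - p.length + 1)).countP
        (fun s => decide ((t.drop s).take p.length = p)) := by
  unfold occ
  have hsplit : t.length + 1 = p.length + (t.length - p.length + 1) := by omega
  rw [hsplit, List.range_add, List.countP_append]
  have h0 : (List.range p.length).countP (fun e => decide (p <:+ t.take e)) = 0 := by
    rw [List.countP_eq_zero]
    intro e he
    simp only [List.mem_range] at he
    simp only [decide_eq_true_eq]
    intro hs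
    have := hs.length_le
    simp only [List.length_take] at this
    omega
  rw [h0, Nat.zero_add, List.countP_map]
  apply List.countP_congr
  intro s hs
  simp only [List.mem_range] at hs
  simp only [Function.comp_apply, decide_eq_true_eq]
  have hlen2 : (t.take (p.length + s)).length = p.length + s := by
    simp only [List.length_take]
    omega
  constructor
  · intro hsuf
    have h := List.suffix_iff_eq_drop.1 hsuf
    rw [hlen2, Nat.add_sub_cancel_left, List.drop_take, Nat.add_sub_cancel] at h
    exact h.symm
  · intro heq
    rw [List.suffix_iff_eq_drop, hlen2, Nat.add_sub_cancel_left, List.drop_take,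
      Nat.add_sub_cancel]
    exact heq.symm

theorem naive_eq (t p : List Char) (hmn : p.length ≤ t.length) :
    naiveCountOcc t p = (occ p t t.length : Int) := by
  unfold naiveCountOcc
  simp only [PySem.List.len_eq]
  have hrange : PySem.List.pyRange 0 ((t.length : Int) - (p.length : Int) + 1) 1 =
      (List.range (t.length - p.length + 1)).map (fun k : Nat => (k : Int)) := by
    rw [PySem.List.pyRange_one]
    have harg : (((t.length : Int) - (p.length : Int) + 1) - 0).toNat
        = t.length - p.length + 1 := by omega
    rw [harg]
    apply List.map_congr_left
    intro k _
    omega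
  rw [hrange, List.foldl_map]
  simp only [PySem.List.slice_natCast_add]
  rw [show (fun (x : Int) (y : Nat) => if (t.drop y).take p.length = p then x + 1 else x)
      = (fun (acc : Int) (y : Nat) =>
          if decide ((t.drop y).take p.length = p) = true then acc + 1 else acc) from by
    funext x y
    simp]
  rw [PySem.List.foldl_count_if (fun s => decide ((t.drop s).take p.length = p)),
    occ_eq_countP p t hmn]
  simp

theorem pair_eq (k v : String) (hk : k.toList ≠ []) (hv : v.toList ≠ []) :
    (let longer := if v.toList.length > k.toList.length then v.toList else k.toList
     let shorter := if v.toList.length > k.toList.length then k.toList else v.toList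
     let count := kmp_search longer shorter
     if count = 0 then "-1" else PySem.Int.toStr (count : Int)) =
    (let longer := if k.toList.length ≥ v.toList.length then k.toList else v.toList
     let shorter := if k.toList.length ≥ v.toList.length then v.toList else k.toList
     let c := naiveCountOcc longer shorter
     if c = 0 then "-1" else PySem.Int.toStr c) := by
  have key : ∀ L S : List Char, S ≠ [] → S.length ≤ L.length →
      (if kmp_search L S = 0 then "-1" else PySem.Int.toStr ((kmp_search L S : Int))) =
      (if naiveCountOcc L S = 0 then "-1" else PySem.Int.toStr (naiveCountOcc L S)) := by
    intro L S hS hLS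
    have hm1 : 1 ≤ S.length := List.length_pos_of_ne_nil hS
    have hc : naiveCountOcc L S = ((kmp_search L S : Nat) : Int) := by
      rw [naive_eq L S hLS, kmp_search_eq L S hS hLS]
    rw [hc]
    by_cases h0 : kmp_search L S = 0
    · rw [if_pos h0, if_pos (by exact_mod_cast congrArg (Nat.cast (R := Int)) h0)]
    · rw [if_neg h0, if_neg (by exact_mod_cast h0)]
  simp only []
  by_cases h : v.toList.length > k.toList.length
  · rw [if_pos h, if_pos h, if_neg (by omega : ¬ k.toList.length ≥ v.toList.length),
      if_neg (by omega : ¬ k.toList.length ≥ v.toList.length)]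
    exact key v.toList k.toList hk (by omega)
  · rw [if_neg h, if_neg h, if_pos (by omega : k.toList.length ≥ v.toList.length),
      if_pos (by omega : k.toList.length ≥ v.toList.length)]
    exact key k.toList v.toList hv (by omega)

theorem toList_ne_nil_iff (s : String) : s.toList ≠ [] ↔ s ≠ "" :=
  not_congr String.toList_eq_nil_iff

-- ===== VERDICT (by name: the statement is the Claim_ definition above) =====
theorem process_pairs_spec : Claim_unchanged_process_pairs := by
  intro pairs hdom hpre
  unfold Spec_process_pairs
  intro hnd
  unfold process_pairs process_pairs_alt
  rw [PySem.List.foldl_append_singleton_eq_map]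
  rw [List.nil_append]
  apply List.map_inj_left.mpr
  intro kv hkv
  have h1 := hpre kv hkv
  have h2 : ¬ (kv.1 = "" ∧ kv.2 = "") := fun hc => hnd ⟨kv, hkv, hc⟩
  have hk : kv.1.toList ≠ [] := (toList_ne_nil_iff _).mpr (by tauto)
  have hv : kv.2.toList ≠ [] := (toList_ne_nil_iff _).mpr (by tauto)
  exact pair_eq kv.1 kv.2 hk hv

theorem process_pairs_changed : Claim_changed_process_pairs := by
  unfold Claim_changed_process_pairs; decide

theorem process_pairs_tight : Claim_exact_process_pairs := by
  intro pairs hdom hpre hd heq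
  obtain ⟨kv, hkv, h1, h2⟩ := hd
  obtain ⟨a, b⟩ := kv
  simp only at h1 h2
  subst h1; subst h2
  unfold process_pairs process_pairs_alt at heq
  rw [PySem.List.foldl_append_singleton_eq_map, List.nil_append] at heq
  have := List.map_inj_left.mp heq ("", "") hkv
  exact absurd this (by decide)
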